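-- pv_equiv track=rewrite | github.com/HarshRajj/LeetCode | 3643-zero-array-transformation-ii/zero-array-transformation-ii.py | willBeZero
-- ===== SOURCE A (Python) =====
-- def willBeZero(arr, queries, k):
--     d = [0] * (len(arr) + 1)
--
--     for i in range(k):
--         l, r, val = queries[i]
--         d[l] += val
--         if r + 1 < len(d):
--             d[r + 1] -= val
--
--     sum_ = 0
--     for i in range(len(arr)):
--         sum_ += d[i]
--         if arr[i] > sum_:
--             return False
--
--     return True
-- ===== SOURCE B (Python) =====
-- # Same result, simpler structure: instead of a difference array + prefix sum,
-- # directly rescan the first k queries at each index and sum the values of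
-- # intervals that cover it.
-- def willBeZero(arr, queries, k):
--     for i, a in enumerate(arr):
--         total = 0
--         for j in range(k):
--             l, r, val = queries[j]
--             if l <= i <= r:
--                 total += val
--         if a > total:
--             return False
--     return True
-- ===== Notes on version B (the rewrite author's own statement) =====
-- stated objective: simpler
-- what changed: replaces the difference-array/prefix-sum machinery with a direct per-index rescan of the first k queries that sums the values of intervals covering each index
-- outside the precondition, e.g. on willBeZero([1], [(-1, 0, 1)], 1): A returns False, B returns True; on willBeZero([1], [(0, -2, 1)], 1): A returns True, B returns False; on willBeZero([0, 0], [(2, 0, 1)], 1): A returns False, B returns True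
import Mathlib
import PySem

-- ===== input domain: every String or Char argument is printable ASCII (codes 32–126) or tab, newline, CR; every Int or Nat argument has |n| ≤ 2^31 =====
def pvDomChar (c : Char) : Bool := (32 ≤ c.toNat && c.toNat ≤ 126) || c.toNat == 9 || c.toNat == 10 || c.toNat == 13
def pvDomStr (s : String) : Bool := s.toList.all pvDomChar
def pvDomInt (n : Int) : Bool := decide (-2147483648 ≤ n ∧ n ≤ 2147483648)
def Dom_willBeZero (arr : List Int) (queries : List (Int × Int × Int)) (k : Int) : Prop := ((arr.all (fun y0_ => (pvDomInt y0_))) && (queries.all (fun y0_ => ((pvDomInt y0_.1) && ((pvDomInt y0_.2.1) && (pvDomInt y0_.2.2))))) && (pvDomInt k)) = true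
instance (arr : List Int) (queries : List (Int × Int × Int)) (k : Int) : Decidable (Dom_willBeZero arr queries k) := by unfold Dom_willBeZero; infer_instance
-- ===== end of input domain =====

-- B replaces A's difference-array + prefix-sum with a direct per-index rescan of the
-- first k queries (objective: simpler); equivalence proved on Pre_ below.

-- ===== PORT A =====
-- one iteration of A's first loop: l, r, val = queries[i]; d[l] += val; if r+1 < len(d): d[r+1] -= val
-- Option state: none = the Python raised (IndexError); unreachable under Pre_.
def stepA (queries : List (Int × Int × Int)) (od : Option (List Int)) (i : Int) : Option (List Int) :=
  od.bind fun d =>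
    (PySem.List.pyGet? queries i).bind fun q =>
      (PySem.List.pyGet? d q.1).bind fun dl =>
        let d1 := PySem.List.pySetD d q.1 (dl + q.2.2)
        if q.2.1 + 1 < (d1.length : Int) then
          (PySem.List.pyGet? d1 (q.2.1 + 1)).bind fun dr =>
            some (PySem.List.pySetD d1 (q.2.1 + 1) (dr - q.2.2))
        else some d1

-- A's second loop: sum_ += d[i]; if arr[i] > sum_: return False
def loopA (d : List Int) : List Int → Nat → Int → Bool
  | [], _, _ => true
  | a :: rest, i, s =>
    let s' := s + PySem.List.pyGetD d (i : Int) 0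
    if a > s' then false else loopA d rest (i + 1) s'

def willBeZero (arr : List Int) (queries : List (Int × Int × Int)) (k : Int) : Bool :=
  match (PySem.List.pyRange 0 k 1).foldl (stepA queries) (some (List.replicate (arr.length + 1) 0)) with
  | none => false   -- Python raises here (IndexError); outside Pre_
  | some d => loopA d arr 0 0

-- ===== PORT B =====
-- B's inner loop: total = sum of val over the first k queries with l <= i <= r
-- (none = queries[j] raised IndexError; outside Pre_)
def covB? (queries : List (Int × Int × Int)) (k : Int) (i : Nat) : Option Int :=
  (PySem.List.pyRange 0 k 1).foldl
    (fun ot j => ot.bind fun t =>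
      (PySem.List.pyGet? queries j).bind fun q =>
        some (if q.1 ≤ (i : Int) ∧ (i : Int) ≤ q.2.1 then t + q.2.2 else t))
    (some 0)

def loopB (queries : List (Int × Int × Int)) (k : Int) : List Int → Nat → Bool
  | [], _ => true
  | a :: rest, i =>
    match covB? queries k i with
    | none => false   -- Python raises here (IndexError); outside Pre_
    | some t => if a > t then false else loopB queries k rest (i + 1)

def willBeZero_alt (arr : List Int) (queries : List (Int × Int × Int)) (k : Int) : Bool :=
  loopB queries k arr 0

-- ===== PRECONDITION & SPEC =====
-- Pre_ excludes k > len(queries) (A raises IndexError) and first-k queries with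
-- l < 0, l > len(arr) or r < l - 1: on those A either raises IndexError or returns a
-- value shaped by negative-index wraparound / reversed-interval difference-array
-- artifacts, equally defensible as B's straight interval reading.
def Pre_willBeZero (arr : List Int) (queries : List (Int × Int × Int)) (k : Int) : Prop :=
  k ≤ (queries.length : Int) ∧
  ∀ q ∈ queries.take k.toNat, 0 ≤ q.1 ∧ q.1 ≤ (arr.length : Int) ∧ q.1 - 1 ≤ q.2.1
instance (arr : List Int) (queries : List (Int × Int × Int)) (k : Int) : Decidable (Pre_willBeZero arr queries k) := by unfold Pre_willBeZero; infer_instance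

def pvWitness_willBeZero : List Int × (List (Int × Int × Int)) × Int := ([1, 0], [(0, 1, 1)], 1)

def Spec_willBeZero (arr : List Int) (queries : List (Int × Int × Int)) (k : Int) (out : Bool) : Prop := out = willBeZero_alt arr queries k
instance (arr : List Int) (queries : List (Int × Int × Int)) (k : Int) (out : Bool) : Decidable (Spec_willBeZero arr queries k out) := by unfold Spec_willBeZero; infer_instance

-- ===== CLAIM (what is proved, stated in full; the proofs are below) =====
def Claim_equal_willBeZero : Prop := ∀ (arr : List Int) (queries : List (Int × Int × Int)) (k : Int), Dom_willBeZero arr queries k → Pre_willBeZero arr queries k → Spec_willBeZero arr queries k (willBeZero arr queries k)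

-- ===== LEMMAS AND PROOFS =====

-- proof-side closed form of B's inner loop: coverage of index i by a query list
def covSum (act : List (Int × Int × Int)) (i : Nat) : Int :=
  act.foldl (fun t q => if q.1 ≤ (i : Int) ∧ (i : Int) ≤ q.2.1 then t + q.2.2 else t) 0

-- sum of a take of a point-bump
lemma sum_take_set (xs : List Int) (t : Nat) (v : Int) (ht : t < xs.length) : ∀ (u : Nat),
    ((xs.set t (xs[t] + v)).take u).sum = (xs.take u).sum + (if t < u then v else 0) := by
  induction xs generalizing t with
  | nil => simp at ht
  | cons x tl ih =>
    intro u
    cases t with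
    | zero =>
      cases u with
      | zero => simp
      | succ u => simp [List.take_succ_cons]; ring
    | succ t =>
      cases u with
      | zero => simp
      | succ u =>
        have h := ih t (by simpa using ht) u
        simp only [List.set_cons_succ, List.take_succ_cons, List.sum_cons,
          List.getElem_cons_succ] at *
        rw [h]
        split_ifs with h1 h2 h2 <;> omega

-- covSum over an appended singleton
lemma covSum_append (xs : List (Int × Int × Int)) (q : Int × Int × Int) (i : Nat) :
    covSum (xs ++ [q]) i = covSum xs i + (if q.1 ≤ (i : Int) ∧ (i : Int) ≤ q.2.1 then q.2.2 else 0) := by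
  unfold covSum
  rw [List.foldl_append]
  simp only [List.foldl_cons, List.foldl_nil]
  split_ifs <;> simp

-- B's inner loop computes covSum of the first-k prefix when k <= len(queries)
lemma covAux (queries : List (Int × Int × Int)) (i : Nat) :
    ∀ m : Nat, m ≤ queries.length →
      covB? queries (m : Int) i = some (covSum (queries.take m) i) := by
  intro m
  induction m with
  | zero =>
    intro _
    unfold covB?
    simp [covSum]
  | succ m ih =>
    intro hm
    have hmq : m < queries.length := by omega
    have hih := ih (by omega)
    have htake : queries.take (m + 1) = queries.take m ++ [queries[m]] := by
      rw [List.take_add_one, List.getElem?_eq_getElem hmq]; rfl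
    have hget : PySem.List.pyGet? queries (m : Int) = some queries[m] := by
      rw [PySem.List.pyGet?_natCast, List.getElem?_eq_getElem hmq]
    unfold covB? at hih ⊢
    push_cast
    rw [PySem.List.pyRange_one_succ_right (by positivity), List.foldl_append, hih]
    simp only [List.foldl_cons, List.foldl_nil, Option.bind_some]
    rw [hget, Option.bind_some, htake, covSum_append]
    split_ifs <;> simp

lemma covB?_eq (queries : List (Int × Int × Int)) (k : Int)
    (hk : k ≤ (queries.length : Int)) (i : Nat) :
    covB? queries k i = some (covSum (queries.take k.toNat) i) := by
  rcases (by omega : k ≤ 0 ∨ 0 < k) with h | h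
  · unfold covB?
    rw [PySem.List.pyRange_one_eq_nil h]
    simp [covSum, Int.toNat_of_nonpos h]
  · rw [show k = (k.toNat : Int) from (Int.toNat_of_nonneg h.le).symm]
    exact covAux queries i k.toNat (by omega)

-- the difference array built by A's first loop has prefix sums equal to B's coverage
lemma build_inv (arr : List Int) (queries : List (Int × Int × Int)) (kn : Nat)
    (hkn : kn ≤ queries.length)
    (hq : ∀ q ∈ queries.take kn, 0 ≤ q.1 ∧ q.1 ≤ (arr.length : Int) ∧ q.1 - 1 ≤ q.2.1) :
    ∀ m : Nat, m ≤ kn → ∃ d,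
      (PySem.List.pyRange 0 (m : Int) 1).foldl (stepA queries) (some (List.replicate (arr.length + 1) 0)) = some d
      ∧ d.length = arr.length + 1
      ∧ ∀ j : Nat, j < arr.length → (d.take (j + 1)).sum = covSum (queries.take m) j := by
  intro m
  induction m with
  | zero =>
    intro _
    refine ⟨List.replicate (arr.length + 1) 0, ?_, by simp, ?_⟩
    · simp
    · intro j _
      simp [covSum, List.take_replicate]
  | succ m ih =>
    intro hm
    obtain ⟨d, hfold, hlen, hinv⟩ := ih (by omega)
    have hmq : m < queries.length := by omega
    have hmem : queries[m] ∈ queries.take kn := by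
      have h1 : (queries.take kn)[m]'(by simp; omega) = queries[m] := List.getElem_take
      exact h1 ▸ List.getElem_mem _
    obtain ⟨hl0, hln, hlr⟩ := hq _ hmem
    have hrange : PySem.List.pyRange 0 ((m : Int) + 1) 1 = PySem.List.pyRange 0 (m : Int) 1 ++ [(m : Int)] :=
      PySem.List.pyRange_one_succ_right (by positivity)
    have htake : queries.take (m + 1) = queries.take m ++ [queries[m]] := by
      rw [List.take_add_one, List.getElem?_eq_getElem hmq]; rfl
    push_cast
    rw [hrange, List.foldl_append, hfold]
    have hget : PySem.List.pyGet? queries (m : Int) = some queries[m] := by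
      rw [PySem.List.pyGet?_natCast, List.getElem?_eq_getElem hmq]
    have hlt : queries[m].1.toNat < d.length := by rw [hlen]; omega
    have hgetl : PySem.List.pyGet? d queries[m].1 = some (d[queries[m].1.toNat]'hlt) :=
      PySem.List.pyGet?_eq_some_getElem d hl0 (by rw [hlen]; push_cast; omega)
    have hd1 : PySem.List.pySetD d queries[m].1 (d[queries[m].1.toNat]'hlt + queries[m].2.2)
        = d.set queries[m].1.toNat (d[queries[m].1.toNat]'hlt + queries[m].2.2) :=
      PySem.List.pySetD_of_nonneg _ _ hl0
    have hltv : (queries[m].1.toNat : Int) = queries[m].1 := Int.toNat_of_nonneg hl0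
    simp only [List.foldl_cons, List.foldl_nil]
    by_cases hg : queries[m].2.1 + 1 < ((arr.length : Int) + 1)
    · -- guard true: both updates happen
      have hlt1 : (queries[m].2.1 + 1).toNat
          < (d.set queries[m].1.toNat (d[queries[m].1.toNat]'hlt + queries[m].2.2)).length := by
        rw [List.length_set, hlen]; omega
      have hrtv : ((queries[m].2.1 + 1).toNat : Int) = queries[m].2.1 + 1 :=
        Int.toNat_of_nonneg (by omega)
      have hgetr : PySem.List.pyGet?
          (d.set queries[m].1.toNat (d[queries[m].1.toNat]'hlt + queries[m].2.2)) (queries[m].2.1 + 1)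
          = some ((d.set queries[m].1.toNat (d[queries[m].1.toNat]'hlt + queries[m].2.2))[(queries[m].2.1 + 1).toNat]'hlt1) :=
        PySem.List.pyGet?_eq_some_getElem _ (by omega) (by rw [List.length_set, hlen]; push_cast; omega)
      have hstep : stepA queries (some d) (m : Int)
          = some ((d.set queries[m].1.toNat (d[queries[m].1.toNat]'hlt + queries[m].2.2)).set
              (queries[m].2.1 + 1).toNat
              ((d.set queries[m].1.toNat (d[queries[m].1.toNat]'hlt + queries[m].2.2))[(queries[m].2.1 + 1).toNat]'hlt1 - queries[m].2.2)) := by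
        unfold stepA
        rw [Option.bind_some, hget, Option.bind_some, hgetl, Option.bind_some]
        simp only [hd1, List.length_set, hlen]
        rw [if_pos (by push_cast; omega), hgetr, Option.bind_some,
          PySem.List.pySetD_of_nonneg _ _ (by omega : (0:Int) ≤ queries[m].2.1 + 1)]
      refine ⟨_, hstep, by simp [hlen], ?_⟩
      intro j hj
      rw [htake, covSum_append]
      have e1 := sum_take_set d queries[m].1.toNat queries[m].2.2 hlt (j + 1)
      have e2 := sum_take_set (d.set queries[m].1.toNat (d[queries[m].1.toNat]'hlt + queries[m].2.2))
        (queries[m].2.1 + 1).toNat (-queries[m].2.2) hlt1 (j + 1)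
      rw [sub_eq_add_neg, e2, e1, hinv j hj]
      split_ifs <;> omega
    · -- guard false: only d[l] += val
      have hstep : stepA queries (some d) (m : Int)
          = some (d.set queries[m].1.toNat (d[queries[m].1.toNat]'hlt + queries[m].2.2)) := by
        unfold stepA
        rw [Option.bind_some, hget, Option.bind_some, hgetl, Option.bind_some]
        simp only [hd1, List.length_set, hlen]
        rw [if_neg (by push_cast; omega)]
      refine ⟨_, hstep, by simp [hlen], ?_⟩
      intro j hj
      rw [htake, covSum_append]
      have e1 := sum_take_set d queries[m].1.toNat queries[m].2.2 hlt (j + 1)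
      rw [e1, hinv j hj]
      split_ifs <;> omega

-- the two scanning loops agree when the running prefix sum matches the coverage
lemma loop_eq (d : List Int) (queries : List (Int × Int × Int)) (k : Int)
    (act : List (Int × Int × Int))
    (hcov : ∀ i : Nat, covB? queries k i = some (covSum act i)) :
    ∀ (rest : List Int) (i : Nat) (s : Int),
      i + rest.length < d.length →
      (∀ j : Nat, i ≤ j → j < i + rest.length →
        s + ((d.drop i).take (j + 1 - i)).sum = covSum act j) →
      loopA d rest i s = loopB queries k rest i := by
  intro rest
  induction rest with
  | nil => intro i s _ _; rfl
  | cons a rest ih =>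
    intro i s hlen hinv
    have hi : i < d.length := by simp only [List.length_cons] at hlen; omega
    have hdrop : d.drop i = d[i] :: d.drop (i + 1) := List.drop_eq_getElem_cons hi
    have hs' : s + PySem.List.pyGetD d (i : Int) 0 = covSum act i := by
      have h0 := hinv i (le_refl i) (by simp only [List.length_cons]; omega)
      rw [hdrop, show i + 1 - i = 1 by omega] at h0
      simp only [List.take_succ_cons, List.take_zero, List.sum_cons, List.sum_nil, add_zero] at h0
      rw [PySem.List.pyGetD_natCast, List.getD_eq_getElem d 0 hi]
      omega
    simp only [loopA, loopB, hcov i, hs']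
    by_cases hcmp : a > covSum act i
    · rw [if_pos hcmp, if_pos hcmp]
    · rw [if_neg hcmp, if_neg hcmp]
      apply ih (i + 1) (covSum act i)
      · simp only [List.length_cons] at hlen; omega
      · intro j hj1 hj2
        have h0 := hinv j (by omega) (by simp only [List.length_cons]; omega)
        rw [hdrop, show j + 1 - i = (j - i) + 1 by omega] at h0
        simp only [List.take_succ_cons, List.sum_cons] at h0
        rw [show j + 1 - (i + 1) = j - i by omega]
        have hgi : s + d[i] = covSum act i := by
          rw [PySem.List.pyGetD_natCast, List.getD_eq_getElem d 0 hi] at hs'; exact hs'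
        omega

-- ===== VERDICT (by name: the statement is the Claim_ definition above) =====
theorem willBeZero_spec : Claim_equal_willBeZero := by
  intro arr queries k _ hpre
  obtain ⟨hkq, hq⟩ := hpre
  unfold Spec_willBeZero willBeZero willBeZero_alt
  have hkn : k.toNat ≤ queries.length := by omega
  have hr : PySem.List.pyRange 0 k 1 = PySem.List.pyRange 0 (k.toNat : Int) 1 := by
    rcases (by omega : 0 ≤ k ∨ k < 0) with h | h
    · rw [Int.toNat_of_nonneg h]
    · rw [PySem.List.pyRange_one_eq_nil h.le,
        PySem.List.pyRange_one_eq_nil (by omega : ((k.toNat : Nat) : Int) ≤ 0)]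
  obtain ⟨d, hfold, hdlen, hinv⟩ := build_inv arr queries k.toNat hkn hq k.toNat (le_refl _)
  rw [hr, hfold]
  show loopA d arr 0 0 = loopB queries k arr 0
  apply loop_eq d queries k (queries.take k.toNat) (covB?_eq queries k hkq)
  · omega
  · intro j h0 hj
    simpa using hinv j (by omega)
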